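-- pv_equiv track=rewrite | github.com/pypi-data/pypi-mirror-379 | packages/volatility3/volatility3-2.26.2-py3-none-any.whl/volatility3/framework/symbols/windows/extensions/consoles.py | _truncate_rows
-- ===== SOURCE A (Python) =====
-- from typing import Generator, List, Union, Tuple
--
-- def _truncate_rows(rows: List[str]) -> List[str]:
--     """To truncate empty rows at the end, walk the list
--     backwards and get the last non-empty row. Use that
--     row index to splice. Rows are created based on the
--     length given in the ROW structure, so empty rows will
--     be ''."""
--
--     non_empty_index = 0
--     rows_traversed = False
--
--     for index, row in enumerate(reversed(rows)):
--         # the string was created based on the length in the ROW structure so it shouldn't have any bad data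
--         if len(row.rstrip()) > 0:
--             non_empty_index = index
--             break
--         rows_traversed = True
--
--     if non_empty_index == 0 and rows_traversed:
--         rows = []
--     else:
--         rows = rows[0 : len(rows) - non_empty_index]
--
--     return rows
-- ===== SOURCE B (Python) =====
-- from typing import List
--
-- def _truncate_rows(rows: List[str]) -> List[str]:
--     """Single forward pass: remember the index of the last non-empty row,
--     then slice up to (and including) it. Returns [] when every row is empty."""
--     last = -1
--     for i, row in enumerate(rows):
--         if row.rstrip():
--             last = i
--     return rows[: last + 1]
-- ===== Notes on version B (the rewrite author's own statement) =====
-- stated objective: simpler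
-- what changed: Replaced the reversed scan with break and the non_empty_index/rows_traversed flag logic by one forward pass that records the last non-empty index and slices rows[:last+1].
import Mathlib
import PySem

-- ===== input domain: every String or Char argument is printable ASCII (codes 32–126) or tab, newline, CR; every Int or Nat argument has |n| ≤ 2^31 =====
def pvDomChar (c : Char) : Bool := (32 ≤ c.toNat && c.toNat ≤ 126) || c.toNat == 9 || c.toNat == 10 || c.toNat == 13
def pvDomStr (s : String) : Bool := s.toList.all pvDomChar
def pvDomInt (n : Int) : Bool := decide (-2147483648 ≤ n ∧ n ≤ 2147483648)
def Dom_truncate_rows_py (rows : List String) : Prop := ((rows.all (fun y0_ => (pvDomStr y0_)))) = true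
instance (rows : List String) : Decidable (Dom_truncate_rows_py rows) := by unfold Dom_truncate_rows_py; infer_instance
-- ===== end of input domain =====

-- B replaces A's reversed scan + break + non_empty_index/rows_traversed flags by one
-- forward pass recording the last non-empty index (objective: simpler).


-- ===== PORT A =====
-- the 'for index, row in enumerate(reversed(rows))' loop with its break:
-- state = (non_empty_index, rows_traversed); returns the state after the loop
def truncateRowsLoopA : List String → Nat → Bool → Nat × Bool
  | [], _, trav => (0, trav)
  | r :: rest, i, trav =>
      if 0 < PySem.Str.len (PySem.Str.rstrip r) then (i, trav)
      else truncateRowsLoopA rest (i + 1) true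

def truncate_rows_py (rows : List String) : List String :=
  let st := truncateRowsLoopA rows.reverse 0 false
  if st.1 = 0 ∧ st.2 = true then []
  else PySem.List.slice rows (some 0) (some ((rows.length : Int) - (st.1 : Int)))

-- ===== PORT B =====
-- B's forward pass: 'last' is the index of the last non-empty row seen so far (-1 if none)
def truncateRowsLoopB : List String → Int → Int → Int
  | [], _, last => last
  | r :: rest, i, last =>
      truncateRowsLoopB rest (i + 1)
        (if 0 < PySem.Str.len (PySem.Str.rstrip r) then i else last)

def truncate_rows_py_alt (rows : List String) : List String :=
  PySem.List.slice rows none (some (truncateRowsLoopB rows 0 (-1) + 1))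

-- ===== PRECONDITION & SPEC =====
def Spec_truncate_rows_py (rows : List String) (out : List String) : Prop := out = truncate_rows_py_alt rows
instance (rows : List String) (out : List String) : Decidable (Spec_truncate_rows_py rows out) := by unfold Spec_truncate_rows_py; infer_instance

-- ===== CLAIM (what is proved, stated in full; the proofs are below) =====
def Claim_equal_truncate_rows_py : Prop := ∀ (rows : List String), Dom_truncate_rows_py rows → Spec_truncate_rows_py rows (truncate_rows_py rows)

-- ===== LEMMAS AND PROOFS =====

-- "row is empty after rstrip"
def pvEmptyRow (r : String) : Bool := decide (PySem.Str.len (PySem.Str.rstrip r) ≤ 0)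

theorem takeWhile_lt_of_not_all {l : List String} (h : l.all pvEmptyRow = false) :
    (l.takeWhile pvEmptyRow).length < l.length := by
  induction l with
  | nil => simp at h
  | cons r rest ih =>
    by_cases hr : pvEmptyRow r = true
    · rw [List.all_cons, hr, Bool.true_and] at h
      have := ih h
      simp only [List.takeWhile_cons, hr, if_pos, List.length_cons]
      omega
    · simp [List.takeWhile_cons, hr]

theorem pvEmptyRow_false (r : String) (hr : 0 < PySem.Str.len (PySem.Str.rstrip r)) :
    pvEmptyRow r = false := by
  simp only [pvEmptyRow, decide_eq_false_iff_not, not_le]; exact hr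

theorem pvEmptyRow_true (r : String) (hr : ¬ 0 < PySem.Str.len (PySem.Str.rstrip r)) :
    pvEmptyRow r = true := by
  simp only [pvEmptyRow, decide_eq_true_eq]; omega

theorem loopA_spec (l : List String) :
    ∀ (i : Nat) (trav : Bool), truncateRowsLoopA l i trav =
      if l.all pvEmptyRow then (0, trav || !l.isEmpty)
      else (i + (l.takeWhile pvEmptyRow).length, trav || !(l.takeWhile pvEmptyRow).isEmpty) := by
  induction l with
  | nil => intro i trav; simp [truncateRowsLoopA]
  | cons r rest ih =>
    intro i trav
    by_cases hr : 0 < PySem.Str.len (PySem.Str.rstrip r)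
    · have he := pvEmptyRow_false r hr
      rw [show truncateRowsLoopA (r :: rest) i trav = (i, trav) by
        simp only [truncateRowsLoopA]; rw [if_pos hr]]
      simp [he, List.takeWhile_cons]
    · have he := pvEmptyRow_true r hr
      rw [show truncateRowsLoopA (r :: rest) i trav = truncateRowsLoopA rest (i + 1) true by
        simp only [truncateRowsLoopA]; rw [if_neg hr]]
      rw [ih]
      by_cases hall : rest.all pvEmptyRow = true
      · simp [hall, he, List.takeWhile_cons]
      · have hallB : rest.all pvEmptyRow = false := eq_false_of_ne_true hall
        simp [hallB, he, List.takeWhile_cons]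
        omega

theorem loopB_spec (l : List String) :
    ∀ (i last : Int), truncateRowsLoopB l i last =
      if l.all pvEmptyRow then last
      else i + ((l.length - 1 - (l.reverse.takeWhile pvEmptyRow).length : Nat) : Int) := by
  induction l with
  | nil => intro i last; simp [truncateRowsLoopB]
  | cons r rest ih =>
    intro i last
    simp only [truncateRowsLoopB]
    rw [ih]
    by_cases hr : 0 < PySem.Str.len (PySem.Str.rstrip r)
    · have he := pvEmptyRow_false r hr
      rw [if_pos hr]
      by_cases hall : rest.all pvEmptyRow = true
      · have hrev : (rest.reverse.takeWhile pvEmptyRow).length = rest.reverse.length := by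
          rw [List.takeWhile_eq_self_iff.mpr]
          · intro x hx
            exact (List.all_eq_true.mp hall) x (by simpa using hx)
        have htw : (List.takeWhile pvEmptyRow (rest.reverse ++ [r])).length = rest.length := by
          rw [List.takeWhile_append, if_pos (by rw [hrev])]
          simp [List.takeWhile_cons, he]
        simp [hall, he, htw]
      · have hallB : rest.all pvEmptyRow = false := eq_false_of_ne_true hall
        have hlt : (rest.reverse.takeWhile pvEmptyRow).length < rest.length := by
          have := takeWhile_lt_of_not_all (l := rest.reverse) (by simpa [List.all_reverse] using hallB)
          simpa using this
        have htw : (List.takeWhile pvEmptyRow (rest.reverse ++ [r])).length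
            = (rest.reverse.takeWhile pvEmptyRow).length := by
          rw [List.takeWhile_append, if_neg (by simp only [List.length_reverse]; omega)]
        simp [hallB, he, htw]
        omega
    · have he := pvEmptyRow_true r hr
      rw [if_neg hr]
      by_cases hall : rest.all pvEmptyRow = true
      · simp [hall, he]
      · have hallB : rest.all pvEmptyRow = false := eq_false_of_ne_true hall
        have hlt : (rest.reverse.takeWhile pvEmptyRow).length < rest.length := by
          have := takeWhile_lt_of_not_all (l := rest.reverse) (by simpa [List.all_reverse] using hallB)
          simpa using this
        have htw : (List.takeWhile pvEmptyRow (rest.reverse ++ [r])).length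
            = (rest.reverse.takeWhile pvEmptyRow).length := by
          rw [List.takeWhile_append, if_neg (by simp only [List.length_reverse]; omega)]
        simp [hallB, he, htw]
        omega

-- both ports compute rows.take (rows.length - k), k = number of trailing empty rows
theorem portA_eq_take (rows : List String) :
    truncate_rows_py rows
      = rows.take (rows.length - (rows.reverse.takeWhile pvEmptyRow).length) := by
  unfold truncate_rows_py
  rw [loopA_spec]
  by_cases hall : rows.reverse.all pvEmptyRow = true
  · rw [if_pos hall]
    have hk : (rows.reverse.takeWhile pvEmptyRow).length = rows.length := by
      rw [List.takeWhile_eq_self_iff.mpr (fun x hx => (List.all_eq_true.mp hall) x hx)]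
      simp
    cases rows with
    | nil =>
      rw [if_neg (by simp)]
      simp [PySem.List.slice]
    | cons r rest =>
      rw [if_pos ⟨rfl, by simp⟩, hk]
      simp
  · rw [if_neg hall]
    have hallB := eq_false_of_ne_true hall
    have hlt : (rows.reverse.takeWhile pvEmptyRow).length < rows.length := by
      have := takeWhile_lt_of_not_all (l := rows.reverse) hallB
      simpa using this
    set k := (rows.reverse.takeWhile pvEmptyRow).length with hkdef
    have hc2 : ¬ (((0 + k, false || !(rows.reverse.takeWhile pvEmptyRow).isEmpty) : Nat × Bool).1 = 0
        ∧ ((0 + k, false || !(rows.reverse.takeWhile pvEmptyRow).isEmpty) : Nat × Bool).2 = true) := by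
      dsimp only
      by_cases hk0 : k = 0
      · have hemp : (rows.reverse.takeWhile pvEmptyRow).isEmpty = true := by
          rw [List.isEmpty_iff_length_eq_zero]; omega
        simp [hemp]
      · rintro ⟨h1, _⟩; omega
    rw [if_neg hc2]
    dsimp only
    have hcast : ((rows.length : Int) - ((0 + k : Nat) : Int)) = (((rows.length - k : Nat)) : Int) := by
      push_cast; omega
    rw [hcast]
    simp [PySem.List.slice_to_natCast]

theorem portB_eq_take (rows : List String) :
    truncate_rows_py_alt rows
      = rows.take (rows.length - (rows.reverse.takeWhile pvEmptyRow).length) := by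
  unfold truncate_rows_py_alt
  rw [loopB_spec]
  by_cases hall : rows.all pvEmptyRow = true
  · rw [if_pos hall]
    have hk : (rows.reverse.takeWhile pvEmptyRow).length = rows.length := by
      rw [List.takeWhile_eq_self_iff.mpr
        (fun x hx => (List.all_eq_true.mp hall) x (by simpa using hx))]
      simp
    rw [show ((-1 : Int) + 1) = ((0 : Nat) : Int) by norm_num, PySem.List.slice_to_natCast]
    simp [hk]
  · rw [if_neg hall]
    have hallB := eq_false_of_ne_true hall
    have hlt : (rows.reverse.takeWhile pvEmptyRow).length < rows.length := by
      have := takeWhile_lt_of_not_all (l := rows.reverse) (by simpa [List.all_reverse] using hallB)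
      simpa using this
    have hcast : ((0 : Int) + ((rows.length - 1 - (rows.reverse.takeWhile pvEmptyRow).length : Nat) : Int) + 1)
        = (((rows.length - (rows.reverse.takeWhile pvEmptyRow).length : Nat)) : Int) := by
      omega
    rw [hcast]
    simp [PySem.List.slice_to_natCast]

-- ===== VERDICT (by name: the statement is the Claim_ definition above) =====
theorem truncate_rows_py_spec : Claim_equal_truncate_rows_py := by
  intro rows _
  unfold Spec_truncate_rows_py
  rw [portA_eq_take, portB_eq_take]
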